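-- pv_equiv track=rewrite | github.com/gxuecai/hgcomon1 | subset.py | get_subset_list
-- ===== SOURCE A (Python) =====
-- def get_subset_list(bandlist):
--     ret_subset = []
--     len_list = len(bandlist)
--     if len_list == 1:
--         return [bandlist]
--     else:
--         subset_fn_1 = get_subset_list(bandlist[1:len_list])
--         ret_subset.append([bandlist[0]])
--         ret_subset += subset_fn_1
--         for subsets in subset_fn_1:
--             ret_subset.append(subsets+[bandlist[0]])
--         return ret_subset
-- ===== SOURCE B (Python) =====
-- def get_subset_list(bandlist):
--     result = [[bandlist[-1]]]
--     for x in reversed(bandlist[:-1]):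
--         result = [[x]] + result + [s + [x] for s in result]
--     return result
-- ===== Notes on version B (the rewrite author's own statement) =====
-- stated objective: alternative
-- what changed: Replaces A's self-recursion on the tail slice with a single iterative fold over the elements from last to first, maintaining the subset list as an accumulator.
import Mathlib
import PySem

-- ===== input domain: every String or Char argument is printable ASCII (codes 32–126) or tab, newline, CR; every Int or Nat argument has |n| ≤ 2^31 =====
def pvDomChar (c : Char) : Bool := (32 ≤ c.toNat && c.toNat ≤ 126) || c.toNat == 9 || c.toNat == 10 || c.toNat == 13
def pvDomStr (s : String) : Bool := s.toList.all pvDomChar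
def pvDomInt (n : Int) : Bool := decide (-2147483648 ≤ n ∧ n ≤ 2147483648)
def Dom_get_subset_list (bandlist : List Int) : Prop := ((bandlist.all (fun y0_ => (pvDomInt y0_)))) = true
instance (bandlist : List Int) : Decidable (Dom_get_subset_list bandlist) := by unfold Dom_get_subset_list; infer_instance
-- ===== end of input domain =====

-- B replaces A's recursion with an iterative right-to-left fold; on [] A raises RecursionError
-- and B raises IndexError, so the empty list is outside Pre_.

-- ===== PORT A =====
-- A recurses on bandlist[1:]; on [] Python A never terminates (RecursionError), the [] branch
-- here is a totality guard only (excluded by Pre_).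
def get_subset_list (bandlist : List Int) : List (List Int) :=
  match bandlist with
  | [] => []
  | [x] => [[x]]
  | x :: rest =>
      let subset_fn_1 := get_subset_list rest
      ([[x]] ++ subset_fn_1) ++ subset_fn_1.map (fun subsets => subsets ++ [x])

-- ===== PORT B =====
-- one loop step: result = [[x]] + result + [s + [x] for s in result]
def pvAltStep (result : List (List Int)) (x : Int) : List (List Int) :=
  [[x]] ++ result ++ result.map (fun s => s ++ [x])

-- B: result = [[bandlist[-1]]]; for x in reversed(bandlist[:-1]): result = pvAltStep result x
-- (the [] branch is a totality guard only; Python B raises IndexError there, excluded by Pre_)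
def get_subset_list_alt (bandlist : List Int) : List (List Int) :=
  match bandlist.getLast? with
  | none => []
  | some last => (bandlist.dropLast).reverse.foldl pvAltStep [[last]]

-- ===== PRECONDITION & SPEC =====
-- Pre_ excludes exactly the empty list, on which A raises RecursionError (and B IndexError).
def Pre_get_subset_list (bandlist : List Int) : Prop := bandlist ≠ []
instance (bandlist : List Int) : Decidable (Pre_get_subset_list bandlist) := by unfold Pre_get_subset_list; infer_instance
def pvWitness_get_subset_list : List Int := ([1, 2, 3])

def Spec_get_subset_list (bandlist : List Int) (out : List (List Int)) : Prop := out = get_subset_list_alt bandlist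
instance (bandlist : List Int) (out : List (List Int)) : Decidable (Spec_get_subset_list bandlist out) := by unfold Spec_get_subset_list; infer_instance

-- ===== CLAIM (what is proved, stated in full; the proofs are below) =====
def Claim_equal_get_subset_list : Prop := ∀ (bandlist : List Int), Dom_get_subset_list bandlist → Pre_get_subset_list bandlist → Spec_get_subset_list bandlist (get_subset_list bandlist)

-- ===== LEMMAS AND PROOFS =====

theorem alt_cons (x : Int) (rest : List Int) (hr : rest ≠ []) :
    get_subset_list_alt (x :: rest) = pvAltStep (get_subset_list_alt rest) x := by
  obtain ⟨y, ys, rfl⟩ := List.exists_cons_of_ne_nil hr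
  unfold get_subset_list_alt
  rw [List.getLast?_cons_cons]
  cases h : (y :: ys).getLast? with
  | none => simp at h
  | some l =>
      simp [List.dropLast_cons_of_ne_nil, List.foldl_append]

theorem a_eq_b (bandlist : List Int) (h : bandlist ≠ []) :
    get_subset_list bandlist = get_subset_list_alt bandlist := by
  induction bandlist with
  | nil => exact absurd rfl h
  | cons x rest ih =>
    cases rest with
    | nil => simp [get_subset_list, get_subset_list_alt]
    | cons y ys =>
      rw [alt_cons x (y :: ys) (by simp), ← ih (by simp)]
      simp [get_subset_list, pvAltStep]

-- ===== VERDICT (by name: the statement is the Claim_ definition above) =====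
theorem get_subset_list_spec : Claim_equal_get_subset_list := by
  intro bandlist _ hpre
  unfold Spec_get_subset_list
  exact a_eq_b bandlist hpre
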